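-- pv_equiv track=rewrite | github.com/Tim4316/CS320-Standard-ML | assigns/04/MySolution/Python/assign04_05.py | wordle_guess
-- ===== SOURCE A (Python) =====
-- def wordle_guess(hints):
--     word_length = len(hints[0])
--     correct_positions = [''] * word_length
--     incorrect_positions = []
--     for hint in hints:
--         for i, (num, char) in enumerate(hint):
--             if num == 1:
--                 correct_positions[i] = char
--             elif num == 2:
--                 incorrect_positions.append(char)
--     for i in range(word_length):
--         if correct_positions[i] == '':
--             for char in incorrect_positions:
--                 if char not in correct_positions:
--                     correct_positions[i] = char
--                     incorrect_positions.remove(char)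
--                     break
--     return ''.join(correct_positions)
-- ===== SOURCE B (Python) =====
-- def wordle_guess(hints):
--     n = len(hints[0])
--     pos = {}
--     extras = []
--     for hint in hints:
--         for i, (num, char) in enumerate(hint):
--             if num == 1:
--                 pos[i] = char
--             elif num == 2:
--                 extras.append(char)
--     correct = [pos.get(i, '') for i in range(n)]
--     seen = set(c for c in correct if c)
--     fill = []
--     for c in extras:
--         if c and c not in seen:
--             fill.append(c)
--             seen.add(c)
--     it = iter(fill)
--     return ''.join(c if c else next(it, '') for c in correct)
-- ===== Notes on version B (the rewrite author's own statement) =====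
-- stated objective: simpler
-- what changed: A's quadratic second phase (for each empty slot, rescan the whole incorrect list against the whole current word and mutate both with set/remove) is replaced by two independent single passes: precompute the deduplicated fill sequence once (a set seeded with the fixed letters), then place it left to right; the fixed positions are kept in a dict materialised once instead of a mutated list.
import Mathlib
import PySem

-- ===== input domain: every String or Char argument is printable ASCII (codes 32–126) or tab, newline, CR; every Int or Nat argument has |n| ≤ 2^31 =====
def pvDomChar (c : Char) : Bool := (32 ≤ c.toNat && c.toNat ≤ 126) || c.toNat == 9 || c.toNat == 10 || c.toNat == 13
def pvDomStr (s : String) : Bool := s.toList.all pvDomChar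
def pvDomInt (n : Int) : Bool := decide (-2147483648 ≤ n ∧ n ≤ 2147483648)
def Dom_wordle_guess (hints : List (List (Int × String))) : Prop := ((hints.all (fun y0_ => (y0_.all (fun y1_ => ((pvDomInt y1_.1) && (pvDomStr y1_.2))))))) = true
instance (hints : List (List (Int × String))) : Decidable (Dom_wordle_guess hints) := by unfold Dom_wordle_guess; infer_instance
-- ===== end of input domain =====

-- B replaces A's nested per-slot rescan (with list.remove) by precomputing the deduplicated
-- fill sequence in one pass over the misplaced letters and placing it in one walk (objective: simpler).

-- ===== PORT A =====
-- inner loop 'for i, (num, char) in enumerate(hint): …' with explicit index counter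
def pvParseA (i : Nat) (st : List String × List String) :
    List (Int × String) → List String × List String
  | [] => st
  | (num, c) :: rest =>
    pvParseA (i + 1)
      (if num = 1 then (st.1.set i c, st.2)
       else if num = 2 then (st.1, st.2 ++ [c]) else st) rest

-- 'for char in incorrect_positions: if char not in correct_positions: … break' plus the
-- subsequent 'incorrect_positions.remove(char)': first eligible char and the list without it
def pvFindRemove (correct : List String) : List String → Option (String × List String)
  | [] => none
  | c :: rest =>
    if c ∉ correct then some (c, rest)
    else (pvFindRemove correct rest).map (fun p => (p.1, c :: p.2))

-- 'for i in range(word_length): …' walking the slots left to right; the current full list is pre ++ rest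
def pvFillA (pre : List String) (inc : List String) : List String → List String
  | [] => pre
  | s :: rest =>
    if s = "" then
      match pvFindRemove (pre ++ s :: rest) inc with
      | some (c, inc') => pvFillA (pre ++ [c]) inc' rest
      | none => pvFillA (pre ++ [s]) inc rest
    else pvFillA (pre ++ [s]) inc rest

def wordle_guess (hints : List (List (Int × String))) : String :=
  let wordLength := (hints.headD []).length
  let parsed := hints.foldl (fun st hint => pvParseA 0 st hint)
    (List.replicate wordLength "", [])
  PySem.Str.join "" (pvFillA [] parsed.2 parsed.1)

-- ===== PORT B =====
-- B's parse loop: positions dict + misplaced-letter list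
def pvParseB (i : Nat) (st : PySem.Dict Nat String × List String) :
    List (Int × String) → PySem.Dict Nat String × List String
  | [] => st
  | (num, c) :: rest =>
    pvParseB (i + 1)
      (if num = 1 then (st.1.insert i c, st.2)
       else if num = 2 then (st.1, st.2 ++ [c]) else st) rest

-- 'for c in extras: if c and c not in seen: fill.append(c); seen.add(c)'
def pvFillSeq (seen : PySem.Set String) (fill : List String) : List String → List String
  | [] => fill
  | c :: rest =>
    if c ≠ "" ∧ c ∉ seen then pvFillSeq (PySem.Set.add seen c) (fill ++ [c]) rest
    else pvFillSeq seen fill rest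

-- ''.join(c if c else next(it, '') for c in correct)
def pvPlace : List String → List String → List String
  | [], _ => []
  | c :: cs, fill =>
    if c = "" then
      match fill with
      | [] => "" :: pvPlace cs []
      | f :: fs => f :: pvPlace cs fs
    else c :: pvPlace cs fill

def wordle_guess_alt (hints : List (List (Int × String))) : String :=
  let n := (hints.headD []).length
  let parsed := hints.foldl (fun st hint => pvParseB 0 st hint) (PySem.Dict.empty, [])
  let correct := (List.range n).map (fun i => parsed.1.getD i "")
  let seen : PySem.Set String := PySem.Set.ofList (correct.filter (fun c => c != ""))
  let fill := pvFillSeq seen [] parsed.2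
  PySem.Str.join "" (pvPlace correct fill)

-- ===== PRECONDITION & SPEC =====
-- Pre_ excludes exactly the inputs where Python A raises IndexError: an empty hints list
-- (len(hints[0])) or a '1' hint at a position ≥ len(hints[0]) (correct_positions[i] = char).
def Pre_wordle_guess (hints : List (List (Int × String))) : Prop :=
  hints ≠ [] ∧ ∀ hint ∈ hints, ∀ i : Nat, i < hint.length →
    (hint.getD i (0, "")).1 = 1 → i < (hints.headD []).length

instance (hints : List (List (Int × String))) : Decidable (Pre_wordle_guess hints) := by
  unfold Pre_wordle_guess; infer_instance

def pvWitness_wordle_guess : (List (List (Int × String))) :=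
  [[(1, "a"), (2, "b")], [(0, "x"), (2, "a")]]

def Spec_wordle_guess (hints : List (List (Int × String))) (out : String) : Prop :=
  out = wordle_guess_alt hints
instance (hints : List (List (Int × String))) (out : String) :
    Decidable (Spec_wordle_guess hints out) := by unfold Spec_wordle_guess; infer_instance

-- ===== CLAIM (what is proved, stated in full; the proofs are below) =====
def Claim_equal_wordle_guess : Prop := ∀ (hints : List (List (Int × String))),
  Dom_wordle_guess hints → Pre_wordle_guess hints →
  Spec_wordle_guess hints (wordle_guess hints)

-- ===== LEMMAS AND PROOFS =====

-- writing slot i of the materialised position list = inserting key i into the position dict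
lemma pv_set_eq_map_insert (n i : Nat) (c : String) (d : PySem.Dict Nat String) :
    ((List.range n).map (fun j => d.getD j "")).set i c
      = (List.range n).map (fun j => (d.insert i c).getD j "") := by
  apply List.ext_getElem
  · simp
  intro k h1 h2
  simp only [List.getElem_set, List.getElem_map, List.getElem_range,
    PySem.Dict.getD_insert]
  by_cases hk : i = k
  · simp [hk]
  · rw [if_neg hk, if_neg (fun hh => hk hh.symm)]

-- A's inner parse loop and B's agree through the list/dict correspondence
lemma pv_parse_row (n : Nat) :
    ∀ (hint : List (Int × String)) (i : Nat) (d : PySem.Dict Nat String) (inc : List String),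
    pvParseA i ((List.range n).map (fun j => d.getD j ""), inc) hint
      = ((List.range n).map (fun j => (pvParseB i (d, inc) hint).1.getD j ""),
         (pvParseB i (d, inc) hint).2) := by
  intro hint
  induction hint with
  | nil => intro i d inc; simp [pvParseA, pvParseB]
  | cons p rest ih =>
    intro i d inc
    obtain ⟨num, c⟩ := p
    by_cases h1 : num = 1
    · simp only [pvParseA, pvParseB, h1]
      rw [pv_set_eq_map_insert]
      exact ih (i + 1) (d.insert i c) inc
    · by_cases h2 : num = 2
      · simp only [pvParseA, pvParseB, h2]
        exact ih (i + 1) d (inc ++ [c])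
      · simp only [pvParseA, pvParseB, if_neg h1, if_neg h2]
        exact ih (i + 1) d inc

-- the whole parse pass: A's (correct, incorrect) = B's (dict materialised over range n, extras)
lemma pv_parse_all (n : Nat) :
    ∀ (hs : List (List (Int × String))) (d : PySem.Dict Nat String) (inc : List String),
    hs.foldl (fun st hint => pvParseA 0 st hint) ((List.range n).map (fun j => d.getD j ""), inc)
      = ((List.range n).map
           (fun j => (hs.foldl (fun st h => pvParseB 0 st h) (d, inc)).1.getD j ""),
         (hs.foldl (fun st h => pvParseB 0 st h) (d, inc)).2) := by
  intro hs
  induction hs with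
  | nil => intro d inc; rfl
  | cons h hs ih =>
    intro d inc
    simp only [List.foldl_cons]
    rw [pv_parse_row n h 0 d inc]
    have := ih (pvParseB 0 (d, inc) h).1 (pvParseB 0 (d, inc) h).2
    simpa using this

-- B's fill loop with any accumulator prefix
lemma pv_fillSeq_acc (inc : List String) :
    ∀ (seen : PySem.Set String) (acc : List String),
    pvFillSeq seen acc inc = acc ++ pvFillSeq seen [] inc := by
  induction inc with
  | nil => intro seen acc; simp [pvFillSeq]
  | cons c rest ih =>
    intro seen acc
    by_cases h : c ≠ "" ∧ c ∉ seen
    · simp only [pvFillSeq, if_pos h]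
      rw [ih, ih _ ([] ++ [c])]
      simp
    · simp only [pvFillSeq, if_neg h]
      exact ih seen acc

-- A's find-first-eligible-and-remove versus B's deduplicated fill sequence: when L holds ''
-- and exactly the seen letters, the fill sequence is the list of A's successive picks
lemma pv_findRemove_fillSeq :
    ∀ (inc L : List String) (seen : PySem.Set String),
    (∀ x, x ∈ L ↔ (x = "" ∨ x ∈ seen)) →
    (pvFindRemove L inc = none → pvFillSeq seen [] inc = []) ∧
    (∀ c inc', pvFindRemove L inc = some (c, inc') →
      (c ≠ "" ∧ c ∉ seen) ∧
      pvFillSeq seen [] inc = c :: pvFillSeq (PySem.Set.add seen c) [] inc') := by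
  intro inc
  induction inc with
  | nil =>
    intro L seen H
    constructor
    · intro _; rfl
    · intro c inc' hc; simp [pvFindRemove] at hc
  | cons d rest ih =>
    intro L seen H
    by_cases hd : d ∈ L
    · have hds : d = "" ∨ d ∈ seen := (H d).1 hd
      have hskip : ¬ (d ≠ "" ∧ d ∉ seen) := by tauto
      constructor
      · intro hn
        simp only [pvFindRemove, if_neg (not_not_intro hd)] at hn
        have : pvFindRemove L rest = none := by
          cases h : pvFindRemove L rest with
          | none => rfl
          | some p => rw [h] at hn; simp at hn
        simp only [pvFillSeq, if_neg hskip]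
        exact (ih L seen H).1 this
      · intro c inc' hc
        simp only [pvFindRemove, if_neg (not_not_intro hd)] at hc
        cases h : pvFindRemove L rest with
        | none => rw [h] at hc; simp at hc
        | some p =>
          rw [h] at hc
          obtain ⟨p1, p2⟩ := p
          simp only [Option.map_some] at hc
          have e1 : p1 = c := congrArg Prod.fst (Option.some.inj hc)
          have e2 : d :: p2 = inc' := congrArg Prod.snd (Option.some.inj hc)
          subst e1; subst e2
          obtain ⟨helig, heq⟩ := (ih L seen H).2 p1 p2 h
          refine ⟨helig, ?_⟩
          simp only [pvFillSeq, if_neg hskip]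
          rw [heq]
          have hskip2 : ¬ (d ≠ "" ∧ d ∉ PySem.Set.add seen p1) := by
            rcases hds with h1 | h1
            · tauto
            · intro hh; exact hh.2 (by rw [PySem.Set.mem_add]; left; exact h1)
          simp only [if_neg hskip2]
    · have hds : ¬ (d = "" ∨ d ∈ seen) := fun h => hd ((H d).2 h)
      push Not at hds
      constructor
      · intro hn; simp only [pvFindRemove, if_pos hd] at hn; exact absurd hn (by simp)
      · intro c inc' hc
        simp only [pvFindRemove, if_pos hd] at hc
        have e1 : d = c := congrArg Prod.fst (Option.some.inj hc)
        have e2 : rest = inc' := congrArg Prod.snd (Option.some.inj hc)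
        subst e1; subst e2
        refine ⟨hds, ?_⟩
        simp only [pvFillSeq, if_pos (And.intro hds.1 hds.2)]
        rw [pv_fillSeq_acc]
        simp

-- the heart: A's in-place per-slot scan = B's precompute-then-place, under the invariant
-- that seen holds exactly the non-empty letters of the current list
lemma pv_fill_main :
    ∀ (rest pre inc : List String) (seen : PySem.Set String),
    (∀ x, x ∈ seen ↔ (x ≠ "" ∧ x ∈ pre ++ rest)) →
    pvFillA pre inc rest = pre ++ pvPlace rest (pvFillSeq seen [] inc) := by
  intro rest
  induction rest with
  | nil => intro pre inc seen H; simp [pvFillA, pvPlace]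
  | cons s rest ih =>
    intro pre inc seen H
    by_cases hs : s = ""
    · subst hs
      have HL : ∀ x, x ∈ pre ++ "" :: rest ↔ (x = "" ∨ x ∈ seen) := by
        intro x
        by_cases hx : x = ""
        · subst hx; simp
        · rw [H x]
          simp [hx]
      obtain ⟨Hnone, Hsome⟩ := pv_findRemove_fillSeq inc (pre ++ "" :: rest) seen HL
      cases hfr : pvFindRemove (pre ++ "" :: rest) inc with
      | none =>
        have hfe : pvFillSeq seen [] inc = [] := Hnone hfr
        simp only [pvFillA, hfr, hfe, pvPlace]
        rw [ih (pre ++ [""]) inc seen ?_]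
        · rw [hfe]; simp
        · intro x; rw [H x]; simp
      | some p =>
        obtain ⟨c, inc'⟩ := p
        obtain ⟨⟨hc1, hc2⟩, heq⟩ := Hsome c inc' hfr
        simp only [pvFillA, hfr, heq, pvPlace]
        rw [ih (pre ++ [c]) inc' (PySem.Set.add seen c) ?_]
        · simp
        · intro x
          rw [PySem.Set.mem_add]
          by_cases hxc : x = c
          · subst hxc; simp [hc1]
          · rw [H x]
            by_cases hx : x = ""
            · subst hx
              simp [hxc]
            · simp [hx, hxc]
    · simp only [pvFillA, if_neg hs, pvPlace]
      rw [ih (pre ++ [s]) inc seen ?_]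
      · simp
      · intro x; rw [H x]; simp

-- ===== VERDICT (by name: the statement is the Claim_ definition above) =====
theorem wordle_guess_spec : Claim_equal_wordle_guess := by
  intro hints _ _
  unfold Spec_wordle_guess wordle_guess wordle_guess_alt
  simp only []
  set n := (hints.headD []).length with hn
  have hinit : (List.replicate n "" : List String)
      = (List.range n).map (fun j => (PySem.Dict.empty : PySem.Dict Nat String).getD j "") := by
    apply List.ext_getElem
    · simp
    · intro k h1 h2
      simp [PySem.Dict.getD, PySem.Dict.get?, PySem.Dict.empty]
  rw [hinit, pv_parse_all n hints PySem.Dict.empty []]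
  set parsedB := hints.foldl (fun st h => pvParseB 0 st h) (PySem.Dict.empty, [])
  set correct := (List.range n).map (fun j => parsedB.1.getD j "")
  congr 1
  apply pv_fill_main
  intro x
  rw [PySem.Set.mem_ofList, List.mem_filter]
  simp [and_comm]
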